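-- pv_equiv track=rewrite | github.com/ayanami2003/GATE | agent/utils.py | extract_tool_used
-- ===== SOURCE A (Python) =====
-- def extract_tool_used(function, tools: list):
--     function = function.strip().split('\n')
--     used_tools = set()
--     for line in function:
--         for tool in tools:
--             if tool in line and not line.startswith('def'):
--                 used_tools.add(tool)
--
--     return used_tools
-- ===== SOURCE B (Python) =====
-- def extract_tool_used(function, tools: list):
--     lines = [ln for ln in function.strip().split('\n') if not ln.startswith('def')]
--     found = set()
--     remaining = list(tools)
--     for line in lines:
--         if not remaining:
--             break
--         still = []
--         for tool in remaining:
--             if tool in line: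
--                 found.add(tool)
--             else:
--                 still.append(tool)
--         remaining = still
--     return found
-- ===== Notes on version B (the rewrite author's own statement) =====
-- stated objective: alternative
-- what changed: Instead of re-testing every tool against every line and deduplicating through the set, B pre-filters the def-lines once and sweeps the lines while maintaining a shrinking candidate list: a tool found is moved to the result and never tested again, and the sweep stops as soon as no candidates remain.
import Mathlib
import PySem

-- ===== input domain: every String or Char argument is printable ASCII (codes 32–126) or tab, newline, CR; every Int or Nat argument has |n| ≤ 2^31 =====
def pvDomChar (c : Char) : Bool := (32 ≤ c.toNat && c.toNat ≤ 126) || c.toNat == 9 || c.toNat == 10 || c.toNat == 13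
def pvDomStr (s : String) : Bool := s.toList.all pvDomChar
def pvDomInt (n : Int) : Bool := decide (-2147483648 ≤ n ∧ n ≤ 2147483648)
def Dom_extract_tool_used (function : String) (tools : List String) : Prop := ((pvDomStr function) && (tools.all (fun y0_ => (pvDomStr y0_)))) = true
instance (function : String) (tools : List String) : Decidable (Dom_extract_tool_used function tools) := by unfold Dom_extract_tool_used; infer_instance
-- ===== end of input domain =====

-- B replaces A's full lines×tools re-scan by a sweep with a shrinking candidate list
-- (found tools are never re-tested; def-lines pre-filtered; stops when no candidates remain);
-- same returned set (alternative decomposition, no speed claim).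

-- ===== PORT A =====
def extract_tool_used (function : String) (tools : List String) : List String :=
  let lines := (PySem.Str.split? (PySem.Str.strip function) "\n").getD []  -- sep "\n" ≠ "": never none
  lines.foldl (fun used line =>
    tools.foldl (fun used tool =>
      if PySem.Str.isIn tool line && !(PySem.Str.startswith line "def")
      then PySem.Set.add used tool else used) used) PySem.Set.empty

-- ===== PORT B =====
-- one line: partition the remaining candidates into found / still-unseen
def etuScanLine (line : String) (remaining : List String)
    (found : PySem.Set String) : PySem.Set String × List String :=
  remaining.foldl (fun acc tool =>
    if PySem.Str.isIn tool line then (PySem.Set.add acc.1 tool, acc.2)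
    else (acc.1, acc.2 ++ [tool])) (found, [])

-- sweep over the (pre-filtered) lines; break when no candidates remain
def etuGo : List String → List String → PySem.Set String → PySem.Set String
  | [], _, found => found
  | _ :: _, [], found => found
  | line :: rest, r :: rs, found =>
      let p := etuScanLine line (r :: rs) found
      etuGo rest p.2 p.1

def extract_tool_used_alt (function : String) (tools : List String) : List String :=
  let lines := ((PySem.Str.split? (PySem.Str.strip function) "\n").getD []).filter
      (fun ln => !(PySem.Str.startswith ln "def"))
  etuGo lines tools PySem.Set.empty

-- ===== PRECONDITION & SPEC =====
def Spec_extract_tool_used (function : String) (tools : List String) (out : List String) : Prop := out = extract_tool_used_alt function tools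
instance (function : String) (tools : List String) (out : List String) : Decidable (Spec_extract_tool_used function tools out) := by unfold Spec_extract_tool_used; infer_instance

-- ===== CLAIM (what is proved, stated in full; the proofs are below) =====
def Claim_equal_extract_tool_used : Prop := ∀ (function : String) (tools : List String), Dom_extract_tool_used function tools → Spec_extract_tool_used function tools (extract_tool_used function tools)

-- ===== LEMMAS AND PROOFS =====

theorem etuGo_nil_remaining (ls : List String) (found : PySem.Set String) :
    etuGo ls [] found = found := by
  cases ls <;> rfl

-- the conditional-add fold is a Set.update of the filtered list
theorem foldl_if_add (l : List String) (c : String → Bool) (s : PySem.Set String) :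
    l.foldl (fun u t => if c t then PySem.Set.add u t else u) s
      = PySem.Set.update s (l.filter c) := by
  induction l generalizing s with
  | nil => simp [PySem.Set.update_nil]
  | cons t rest ih =>
      by_cases h : c t = true
      · simp only [List.foldl_cons, List.filter_cons, h, ite_true]
        rw [ih, PySem.Set.update_cons]
      · simp only [Bool.not_eq_true] at h
        simp only [List.foldl_cons, List.filter_cons, h, ite_false, Bool.false_eq_true]
        exact ih s

-- etuScanLine computes (update by the matching candidates, unmatched candidates)
theorem etuScanLine_eq (line : String) (remaining : List String) (found : PySem.Set String) :
    etuScanLine line remaining found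
      = (PySem.Set.update found (remaining.filter (fun t => PySem.Str.isIn t line)),
         remaining.filter (fun t => !(PySem.Str.isIn t line))) := by
  have aux : ∀ (l : List String) (s : PySem.Set String) (acc : List String),
      l.foldl (fun acc tool =>
        if PySem.Str.isIn tool line then (PySem.Set.add acc.1 tool, acc.2)
        else (acc.1, acc.2 ++ [tool])) (s, acc)
      = (PySem.Set.update s (l.filter (fun t => PySem.Str.isIn t line)),
         acc ++ l.filter (fun t => !(PySem.Str.isIn t line))) := by
    intro l
    induction l with
    | nil => intro s acc; simp [PySem.Set.update_nil]
    | cons t rest ih =>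
        intro s acc
        by_cases h : PySem.Str.isIn t line = true
        · simp only [List.foldl_cons, List.filter_cons, h, Bool.not_true, Bool.false_eq_true, if_true, if_false]
          rw [ih, PySem.Set.update_cons]
        · simp only [List.foldl_cons, List.filter_cons, h, Bool.not_false, Bool.false_eq_true, if_true, if_false]
          rw [ih, List.append_assoc]
          rfl
  simpa [etuScanLine, PySem.Set.update_nil] using aux remaining found []

theorem contains_update_eq (s : PySem.Set String) (xs : List String) (y : String) :
    PySem.Set.contains (PySem.Set.update s xs) y
      = (PySem.Set.contains s y || decide (y ∈ xs)) := by
  rw [Bool.eq_iff_iff]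
  simp [PySem.Set.mem_update]

-- filter commutes with ofList (first-occurrence dedup)
theorem filter_ofList (q : String → Bool) (m : List String) :
    (PySem.Set.ofList m).filter q = PySem.Set.ofList (m.filter q) := by
  induction m with
  | nil => rfl
  | cons x xs ih =>
      by_cases h : q x = true
      · conv_rhs => rw [List.filter_cons, if_pos h, PySem.Set.ofList_cons]
        rw [PySem.Set.ofList_cons, ← ih, List.filter_cons, if_pos h]
        simp only [PySem.Set.discard, List.filter_filter]
        congr 1
        refine List.filter_congr ?_
        intro a _
        cases ha : (a == x) <;> cases hq : q a <;> rfl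
      · conv_rhs => rw [List.filter_cons, if_neg (by simp [h]), ← ih]
        rw [PySem.Set.ofList_cons, List.filter_cons, if_neg (by simp [h])]
        simp only [PySem.Set.discard, List.filter_filter]
        refine List.filter_congr ?_
        intro a _
        rcases eq_or_ne a x with rfl | hne
        · simp [h]
        · simp [hne]

-- key step: updating by the matching candidates = updating by all matching tools
theorem update_filter_eq (found : PySem.Set String) (tools : List String) (c : String → Bool) :
    PySem.Set.update found
        ((tools.filter (fun t => !(PySem.Set.contains found t))).filter c)
      = PySem.Set.update found (tools.filter c) := by
  rw [PySem.Set.update_eq_append_filter, PySem.Set.update_eq_append_filter]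
  congr 1
  rw [filter_ofList, filter_ofList]
  congr 1
  simp only [List.filter_filter]
  refine List.filter_congr ?_
  intro a _
  cases hc : c a <;> cases hf : found.contains a <;> simp

-- the unmatched candidates are exactly the tools absent from the new found-set
theorem still_eq (found : PySem.Set String) (tools : List String) (c : String → Bool) :
    (tools.filter (fun t => !(PySem.Set.contains found t))).filter (fun t => !(c t))
      = tools.filter
          (fun t => !(PySem.Set.contains (PySem.Set.update found (tools.filter c)) t)) := by
  rw [List.filter_filter]
  refine List.filter_congr ?_
  intro t ht
  rw [contains_update_eq]
  by_cases hc : c t = true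
  · simp [hc, List.mem_filter, ht]
  · simp only [Bool.not_eq_true] at hc
    have : t ∉ tools.filter c := by
      intro hm; have := List.of_mem_filter hm; simp [hc] at this
    simp [hc, this]

-- A's per-line step, named
def etuAStep (tools : List String) (used : PySem.Set String) (line : String) : PySem.Set String :=
  tools.foldl (fun used tool =>
    if PySem.Str.isIn tool line && !(PySem.Str.startswith line "def")
    then PySem.Set.add used tool else used) used

theorem main_inv (lines tools : List String) (found : PySem.Set String) :
    lines.foldl (etuAStep tools) found
      = etuGo (lines.filter (fun ln => !(PySem.Str.startswith ln "def")))
          (tools.filter (fun t => !(PySem.Set.contains found t))) found := by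
  induction lines generalizing found with
  | nil =>
      rw [List.foldl_nil, List.filter_nil]
      cases hh : tools.filter (fun t => !(PySem.Set.contains found t)) <;> rfl
  | cons line rest ih =>
      by_cases hdef : PySem.Str.startswith line "def" = true
      · have hdefC : PySem.Chars.startswith line.toList ['d', 'e', 'f'] = true := by
          simpa using hdef
        have hstep : etuAStep tools found line = found := by
          unfold etuAStep
          rw [foldl_if_add]
          have hnil : tools.filter (fun t => PySem.Str.isIn t line && !(PySem.Str.startswith line "def")) = [] := by
            apply List.filter_eq_nil_iff.2
            intro t _; simp [hdefC]
          rw [hnil, PySem.Set.update_nil]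
        rw [List.foldl_cons, hstep, List.filter_cons, if_neg (by simp [hdefC]), ih]
      · simp only [Bool.not_eq_true] at hdef
        have hdefC : PySem.Chars.startswith line.toList ['d', 'e', 'f'] = false := by
          simpa using hdef
        have hstep : etuAStep tools found line
            = PySem.Set.update found (tools.filter (fun t => PySem.Str.isIn t line)) := by
          unfold etuAStep
          rw [foldl_if_add]
          congr 1
          refine List.filter_congr ?_
          intro t _; simp [hdefC]
        rw [List.foldl_cons, hstep, ih, List.filter_cons, if_pos (by simp [hdefC])]
        cases hRc : tools.filter (fun t => !(PySem.Set.contains found t)) with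
        | nil =>
            have hfound' : PySem.Set.update found (tools.filter (fun t => PySem.Str.isIn t line)) = found := by
              rw [← update_filter_eq found tools (fun t => PySem.Str.isIn t line), hRc,
                List.filter_nil, PySem.Set.update_nil]
            rw [hfound', hRc, etuGo_nil_remaining, etuGo_nil_remaining]
        | cons r rs =>
            rw [show etuGo (line :: rest.filter (fun ln => !(PySem.Str.startswith ln "def"))) (r :: rs) found
                  = etuGo (rest.filter (fun ln => !(PySem.Str.startswith ln "def")))
                      (etuScanLine line (r :: rs) found).2 (etuScanLine line (r :: rs) found).1 from rfl]
            rw [etuScanLine_eq, ← hRc]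
            rw [update_filter_eq found tools (fun t => PySem.Str.isIn t line)]
            rw [still_eq found tools (fun t => PySem.Str.isIn t line)]

-- ===== VERDICT (by name: the statement is the Claim_ definition above) =====
theorem extract_tool_used_spec : Claim_equal_extract_tool_used := by
  intro function tools _
  unfold Spec_extract_tool_used extract_tool_used extract_tool_used_alt
  rw [show (fun (used : PySem.Set String) (line : String) =>
        tools.foldl (fun used tool =>
          if PySem.Str.isIn tool line && !(PySem.Str.startswith line "def")
          then PySem.Set.add used tool else used) used) = etuAStep tools from rfl]
  rw [main_inv]
  congr 1
  refine List.filter_eq_self.2 ?_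
  intro t _
  rfl
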